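-- pv_equiv track=rewrite | github.com/StefannusChristian/Computer_Network | ip_converter/ip6_from_binary_to_hexa.py | convert_to_hexadecimal
-- ===== SOURCE A (Python) =====
-- def make_groups(hexa_list: list):
--     groups = []
--     curr = 0
--     curr_bin = ''
--     for i in hexa_list:
--         curr_bin += i
--         curr += 1
--         if curr == 4:
--             groups.append(curr_bin)
--             curr_bin = ''
--             curr = 0
--     return groups
--
-- def split_four(binary_address: str):
--     binary_address = binary_address.replace(':', '')
--     result = []
--     curr = 0
--     curr_bin = ''
--     for i in binary_address:
--         curr_bin += i
--         curr += 1
--         if curr == 4: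
--             result.append(curr_bin)
--             curr_bin = ''
--             curr = 0
--     result_test = ''.join(result)
--     assert result_test == binary_address
--     return result
--
-- def find_index(binary_len_four):
--     one_index = []
--     for i in range(len(binary_len_four)):
--         if binary_len_four[i] == '1':
--             one_index.append(i)
--     return one_index
--
-- def find_sum(binary_len_four):
--     the_sums = []
--     for i in binary_len_four:
--         the_index = find_index(i)
--         curr_sum = 0
--         for index in the_index:
--             if index == 0:
--                 curr_sum += 8
--             elif index == 1:
--                 curr_sum += 4
--             elif index == 2:
--                 curr_sum += 2
--             elif index == 3:
--                 curr_sum += 1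
--         the_sums.append(curr_sum)
--     return the_sums
--
-- def make_hexa_dict():
--     hexas = {i: str(i) for i in range(10)}
--     letters = ['A', 'B', 'C', 'D', 'E', 'F']
--     left_numbers = [i for i in range(10, 16)]
--     for num, letter in zip(left_numbers, letters):
--         hexas[num] = letter
--     return hexas
--
-- def add_double_dots(groups):
--     groups = ''.join(groups)
--     count = 0
--     result = ''
--     for i in groups:
--         result += i
--         count += 1
--         if count == 4:
--             result += ':'
--             count = 0
--     result = result[:len(result)-1]
--     return result
--
-- def convert_to_hexadecimal(binary_address: str):
--     hexa_dict = make_hexa_dict()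
--     # type(fours) = list
--     fours = split_four(binary_address)
--     the_sums = find_sum(fours)
--     hexa_result = []
--     for sums in the_sums:
--         the_hexa = hexa_dict[sums]
--         hexa_result.append(the_hexa)
--     groups = make_groups(hexa_result)
--     result = add_double_dots(groups)
--     return result
-- ===== SOURCE B (Python) =====
-- HEX_DIGITS = "0123456789ABCDEF"
--
-- def convert_to_hexadecimal(binary_address: str):
--     bits = binary_address.replace(':', '')
--     assert len(bits) % 4 == 0
--     digits = ''
--     while bits:
--         chunk = bits[:4]
--         bits = bits[4:]
--         value = ((8 if chunk[0] == '1' else 0)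
--                  + (4 if chunk[1] == '1' else 0)
--                  + (2 if chunk[2] == '1' else 0)
--                  + (1 if chunk[3] == '1' else 0))
--         digits += HEX_DIGITS[value]
--     groups = []
--     while len(digits) >= 4:
--         groups.append(digits[:4])
--         digits = digits[4:]
--     return ':'.join(groups)
-- ===== Notes on version B (the rewrite author's own statement) =====
-- stated objective: simpler
-- what changed: A's six-helper pipeline (per-chunk index lists, an if-chain summing bit weights, an int-to-hex dict built from ranges, two counter-based grouping folds and a join-every-4-then-drop-last-char formatter) is replaced by one function that peels 4-character chunks off the stripped string, computes each hex digit directly by bit arithmetic and a 16-character table, and joins groups of 4 digits with ':' (dropping a trailing partial group exactly as A's make_groups does).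
import Mathlib
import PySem

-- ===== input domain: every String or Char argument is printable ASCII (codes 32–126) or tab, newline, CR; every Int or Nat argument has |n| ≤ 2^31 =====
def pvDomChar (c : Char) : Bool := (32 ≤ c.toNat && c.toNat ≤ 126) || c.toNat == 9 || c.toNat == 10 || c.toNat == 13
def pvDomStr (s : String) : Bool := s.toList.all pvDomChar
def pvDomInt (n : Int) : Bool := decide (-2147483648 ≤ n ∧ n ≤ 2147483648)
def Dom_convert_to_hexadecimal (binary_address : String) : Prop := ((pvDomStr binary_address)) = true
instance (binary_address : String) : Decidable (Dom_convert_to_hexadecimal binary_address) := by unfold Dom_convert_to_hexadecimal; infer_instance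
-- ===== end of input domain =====

-- B replaces A's six-helper pipeline (index lists, a sum dispatch, an int→hex dict, two grouping folds
-- and a join-then-trim formatter) by one chunk-peeling loop with bit weights and a hex-digit table: simpler.

-- ===== PORT A =====
-- Strings are handled as List Char per the PySem.Chars convention; String.ofList at the boundary.

-- make_groups(hexa_list): elements are (1-char) strings, concatenated 4 at a time
def pvMakeGroups (hexa_list : List (List Char)) : List (List Char) :=
  (hexa_list.foldl
    (fun (st : List (List Char) × Int × List Char) i =>
      let curr_bin := st.2.2 ++ i
      let curr := st.2.1 + 1
      if curr = 4 then (st.1 ++ [curr_bin], 0, ([] : List Char))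
      else (st.1, curr, curr_bin))
    ([], 0, [])).1

-- split_four: the assert always holds under Pre_ (stripped length a multiple of 4), so it is not modelled
def pvSplitFour (binary_address : List Char) : List (List Char) :=
  let ba := PySem.Chars.replace binary_address [':'] []
  (ba.foldl
    (fun (st : List (List Char) × Int × List Char) i =>
      let curr_bin := st.2.2 ++ [i]
      let curr := st.2.1 + 1
      if curr = 4 then (st.1 ++ [curr_bin], 0, ([] : List Char))
      else (st.1, curr, curr_bin))
    ([], 0, [])).1

def pvFindIndex (binary_len_four : List Char) : List Int :=
  (PySem.List.pyRange 0 (binary_len_four.length : Int) 1).foldl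
    (fun one_index i =>
      if PySem.List.pyGetD binary_len_four i ' ' = '1' then one_index ++ [i] else one_index)
    []

def pvFindSum (binary_len_four : List (List Char)) : List Int :=
  binary_len_four.foldl
    (fun the_sums i =>
      let the_index := pvFindIndex i
      let curr_sum := the_index.foldl
        (fun curr_sum index =>
          if index = 0 then curr_sum + 8
          else if index = 1 then curr_sum + 4
          else if index = 2 then curr_sum + 2
          else if index = 3 then curr_sum + 1
          else curr_sum)
        0
      the_sums ++ [curr_sum])
    []

def pvMakeHexaDict : PySem.Dict Int (List Char) :=
  let hexas := (PySem.List.pyRange 0 10 1).foldl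
    (fun d i => d.insert i (PySem.Int.toChars i)) PySem.Dict.empty
  let letters : List (List Char) := [['A'], ['B'], ['C'], ['D'], ['E'], ['F']]
  let left_numbers := PySem.List.pyRange 10 16 1
  (left_numbers.zip letters).foldl (fun d p => d.insert p.1 p.2) hexas

def pvAddDoubleDots (groups : List (List Char)) : List Char :=
  let g := PySem.Chars.join [] groups
  let st := g.foldl
    (fun (st : List Char × Int) i =>
      let result := st.1 ++ [i]
      let count := st.2 + 1
      if count = 4 then (result ++ [':'], 0) else (result, count))
    ([], 0)
  PySem.List.slice st.1 none (some ((st.1.length : Int) - 1))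

def convert_to_hexadecimal (binary_address : String) : String :=
  let hexa_dict := pvMakeHexaDict
  let fours := pvSplitFour binary_address.toList
  let the_sums := pvFindSum fours
  -- hexa_dict[sums]: every sum is in 0..15, so the KeyError default is unreachable
  let hexa_result := the_sums.foldl (fun acc sums => acc ++ [hexa_dict.getD sums ['?']]) []
  let groups := pvMakeGroups hexa_result
  String.ofList (pvAddDoubleDots groups)

-- ===== PORT B =====
def pvHexTable : List Char :=
  ['0','1','2','3','4','5','6','7','8','9','A','B','C','D','E','F']

-- 'while bits:' chunk-peeling loop; chunk[1..3] cannot raise under Pre_ (length a multiple of 4),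
-- so the IndexError-free pyGetD default is unreachable there
def pvAltDigits (bits : List Char) : List Char :=
  if h : bits = [] then []
  else
    let chunk := PySem.List.slice bits none (some 4)
    let rest := PySem.List.slice bits (some 4) none
    let value : Int :=
      (if PySem.List.pyGetD chunk 0 ' ' = '1' then 8 else 0)
      + (if PySem.List.pyGetD chunk 1 ' ' = '1' then 4 else 0)
      + (if PySem.List.pyGetD chunk 2 ' ' = '1' then 2 else 0)
      + (if PySem.List.pyGetD chunk 3 ' ' = '1' then 1 else 0)
    PySem.List.pyGetD pvHexTable value '?' :: pvAltDigits rest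
termination_by bits.length
decreasing_by
  have : (PySem.List.slice bits (some 4) none) = bits.drop 4 := by
    simpa using PySem.List.slice_from bits (a := 4) (by norm_num)
  rw [this]
  cases bits with
  | nil => exact absurd rfl h
  | cons x xs => simp [List.length_drop]

-- 'while len(digits) >= 4:' grouping loop
def pvAltGroups (digits : List Char) : List (List Char) :=
  if _h : digits.length ≥ 4 then
    PySem.List.slice digits none (some 4) :: pvAltGroups (PySem.List.slice digits (some 4) none)
  else []
termination_by digits.length
decreasing_by
  have : (PySem.List.slice digits (some 4) none) = digits.drop 4 := by
    simpa using PySem.List.slice_from digits (a := 4) (by norm_num)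
  rw [this]
  simp only [List.length_drop]
  omega

def convert_to_hexadecimal_alt (binary_address : String) : String :=
  let bits := PySem.Chars.replace binary_address.toList [':'] []
  let digits := pvAltDigits bits
  let groups := pvAltGroups digits
  String.ofList (PySem.Chars.join [':'] groups)

-- ===== PRECONDITION & SPEC =====
-- Pre_ excludes exactly the inputs where A raises AssertionError (stripped length not a multiple of 4);
-- B raises the same AssertionError there.
def Pre_convert_to_hexadecimal (binary_address : String) : Prop :=
  (binary_address.toList.filter (· ≠ ':')).length % 4 = 0
instance (binary_address : String) : Decidable (Pre_convert_to_hexadecimal binary_address) := by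
  unfold Pre_convert_to_hexadecimal; infer_instance

def pvWitness_convert_to_hexadecimal : String := "1010:0000"

def Spec_convert_to_hexadecimal (binary_address : String) (out : String) : Prop := out = convert_to_hexadecimal_alt binary_address
instance (binary_address : String) (out : String) : Decidable (Spec_convert_to_hexadecimal binary_address out) := by unfold Spec_convert_to_hexadecimal; infer_instance

-- ===== CLAIM (what is proved, stated in full; the proofs are below) =====
def Claim_equal_convert_to_hexadecimal : Prop := ∀ (binary_address : String), Dom_convert_to_hexadecimal binary_address → Pre_convert_to_hexadecimal binary_address → Spec_convert_to_hexadecimal binary_address (convert_to_hexadecimal binary_address)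

-- ===== LEMMAS AND PROOFS =====

-- replace(s, ':', '') is filtering out ':'
lemma replace_go_colon (l : List Char) (fuel : Nat) (acc : List Char) (hf : l.length ≤ fuel) :
    PySem.Chars.replace.go [':'] [] fuel l acc = acc.reverse ++ l.filter (· ≠ ':') := by
  induction l generalizing fuel acc with
  | nil => cases fuel <;> simp [PySem.Chars.replace.go]
  | cons c t ih =>
    cases fuel with
    | zero => simp at hf
    | succ f =>
      simp only [PySem.Chars.replace.go]
      by_cases hc : c = ':'
      · subst hc
        rw [if_pos (by simp [List.isPrefixOf])]
        simp only [List.length_cons, List.length_nil, List.drop_succ_cons, List.drop_zero,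
          List.reverse_nil, List.nil_append]
        rw [ih f acc (by simpa using hf)]
        simp
      · rw [if_neg (by simp [List.isPrefixOf]; exact fun hh => hc hh.symm)]
        rw [ih f (c :: acc) (by simpa using hf)]
        simp [hc]

lemma replace_colon (l : List Char) :
    PySem.Chars.replace l [':'] [] = l.filter (· ≠ ':') := by
  have h := replace_go_colon l l.length [] le_rfl
  simpa [PySem.Chars.replace] using h

-- the reference chunking: consecutive blocks of 4, remainder dropped
def pvChunks : List Char → List (List Char)
  | a :: b :: c :: d :: t => [a, b, c, d] :: pvChunks t
  | _ => []

def pvHexOf (g : List Char) : Char :=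
  PySem.List.pyGetD pvHexTable
    ((if PySem.List.pyGetD g 0 ' ' = '1' then 8 else 0)
      + (if PySem.List.pyGetD g 1 ' ' = '1' then 4 else 0)
      + (if PySem.List.pyGetD g 2 ' ' = '1' then 2 else 0)
      + (if PySem.List.pyGetD g 3 ' ' = '1' then 1 else 0)) '?'

def pvSumOf (g : List Char) : Int :=
  (pvFindIndex g).foldl
    (fun curr_sum index =>
      if index = 0 then curr_sum + 8
      else if index = 1 then curr_sum + 4
      else if index = 2 then curr_sum + 2
      else if index = 3 then curr_sum + 1
      else curr_sum)
    0

lemma pvChunks_length (l : List Char) : ∀ g ∈ pvChunks l, g.length = 4 := by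
  induction l using pvChunks.induct with
  | case1 a b c d t ih =>
    intro g hg
    simp only [pvChunks, List.mem_cons] at hg
    rcases hg with rfl | hg
    · rfl
    · exact ih g hg
  | case2 l h => intro g hg; simp [pvChunks] at hg

-- A's split_four fold produces the 4-chunks
lemma foldSplit (l : List Char) (acc : List (List Char)) :
    (l.foldl
      (fun (st : List (List Char) × Int × List Char) i =>
        let curr_bin := st.2.2 ++ [i]
        let curr := st.2.1 + 1
        if curr = 4 then (st.1 ++ [curr_bin], 0, ([] : List Char))
        else (st.1, curr, curr_bin))
      (acc, 0, [])).1 = acc ++ pvChunks l := by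
  induction l using pvChunks.induct generalizing acc with
  | case1 a b c d t ih =>
    simp only [List.foldl_cons]
    norm_num
    rw [ih]
    simp [pvChunks]
  | case2 l h =>
    rcases l with _ | ⟨a, _ | ⟨b, _ | ⟨c, _ | ⟨d, t⟩⟩⟩⟩
    · simp [pvChunks]
    · simp [List.foldl, pvChunks]
    · simp [List.foldl, pvChunks]
    · simp [List.foldl, pvChunks]
    · exact ((h a b c d t rfl).elim)

lemma pvSplitFour_eq (l : List Char) :
    pvSplitFour l = pvChunks (PySem.Chars.replace l [':'] []) := by
  simpa [pvSplitFour] using foldSplit (PySem.Chars.replace l [':'] []) []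

-- A's make_groups fold over one-char strings produces the 4-chunks of the underlying chars
lemma foldGroups (ds : List Char) (acc : List (List Char)) :
    ((ds.map (fun c => [c])).foldl
      (fun (st : List (List Char) × Int × List Char) i =>
        let curr_bin := st.2.2 ++ i
        let curr := st.2.1 + 1
        if curr = 4 then (st.1 ++ [curr_bin], 0, ([] : List Char))
        else (st.1, curr, curr_bin))
      (acc, 0, [])).1 = acc ++ pvChunks ds := by
  induction ds using pvChunks.induct generalizing acc with
  | case1 a b c d t ih =>
    simp only [List.map_cons, List.foldl_cons]
    norm_num
    rw [ih]
    simp [pvChunks]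
  | case2 l h =>
    rcases l with _ | ⟨a, _ | ⟨b, _ | ⟨c, _ | ⟨d, t⟩⟩⟩⟩
    · simp [pvChunks]
    · simp [List.foldl, pvChunks]
    · simp [List.foldl, pvChunks]
    · simp [List.foldl, pvChunks]
    · exact ((h a b c d t rfl).elim)

lemma pvMakeGroups_eq (ds : List Char) :
    pvMakeGroups (ds.map (fun c => [c])) = pvChunks ds := by
  simpa [pvMakeGroups] using foldGroups ds []

lemma pvFindSum_eq (fours : List (List Char)) :
    pvFindSum fours = fours.map pvSumOf := by
  simp only [pvFindSum]
  rw [PySem.List.foldl_append_singleton_eq_map]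
  simp [pvSumOf]

-- indexing a 4-char chunk
lemma pyGetD_four_zero (a b c d : Char) : PySem.List.pyGetD [a, b, c, d] (0 : Int) ' ' = a := rfl
lemma pyGetD_four_one (a b c d : Char) : PySem.List.pyGetD [a, b, c, d] (1 : Int) ' ' = b := rfl
lemma pyGetD_four_two (a b c d : Char) : PySem.List.pyGetD [a, b, c, d] (2 : Int) ' ' = c := rfl
lemma pyGetD_four_three (a b c d : Char) : PySem.List.pyGetD [a, b, c, d] (3 : Int) ' ' = d := rfl

lemma findIndex_four (a b c d : Char) :
    pvFindIndex [a, b, c, d]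
      = (((if a = '1' then [(0 : Int)] else []) ++ (if b = '1' then [1] else []))
          ++ (if c = '1' then [2] else [])) ++ (if d = '1' then [3] else []) := by
  have hr : PySem.List.pyRange 0 (([a, b, c, d] : List Char).length : Int) 1 = [0, 1, 2, 3] := by
    show PySem.List.pyRange 0 ((4 : Nat) : Int) 1 = [0, 1, 2, 3]
    decide
  simp only [pvFindIndex, hr, List.foldl_cons, List.foldl_nil,
    pyGetD_four_zero, pyGetD_four_one, pyGetD_four_two, pyGetD_four_three]
  split_ifs <;> simp

-- dictionary lookup of the chunk's sum is B's hex digit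
lemma sum_hex (a b c d : Char) :
    pvMakeHexaDict.getD (pvSumOf [a, b, c, d]) ['?'] = [pvHexOf [a, b, c, d]] := by
  by_cases ha : a = '1' <;> by_cases hb : b = '1' <;> by_cases hc : c = '1' <;> by_cases hd : d = '1' <;>
    · simp only [pvSumOf, pvHexOf, findIndex_four, pyGetD_four_zero, pyGetD_four_one,
        pyGetD_four_two, pyGetD_four_three, ha, hb, hc, hd, if_true, if_false,
        List.append_nil, List.nil_append, List.cons_append,
        List.foldl_cons, List.foldl_nil]
      decide

-- B's digit loop computes the chunk digits
lemma altDigits_eq : ∀ (bits : List Char), bits.length % 4 = 0 →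
    pvAltDigits bits = (pvChunks bits).map pvHexOf := by
  intro bits
  induction bits using pvChunks.induct with
  | case1 a b c d t ih =>
    intro h
    have h1 : PySem.List.slice (a :: b :: c :: d :: t) none (some 4) = [a, b, c, d] := by
      rw [PySem.List.slice_to _ (by norm_num)]; rfl
    have h2 : PySem.List.slice (a :: b :: c :: d :: t) (some 4) none = t := by
      rw [PySem.List.slice_from _ (by norm_num)]; rfl
    rw [pvAltDigits, dif_neg (by simp)]
    simp only [h1, h2]
    rw [ih (by simp only [List.length_cons] at h ⊢; omega)]
    simp [pvChunks, pvHexOf]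
  | case2 l hl =>
    intro h
    rcases l with _ | ⟨a, _ | ⟨b, _ | ⟨c, _ | ⟨d, t⟩⟩⟩⟩
    · rw [pvAltDigits]; simp [pvChunks]
    · simp at h
    · simp at h
    · simp at h
    · exact ((hl a b c d t rfl).elim)

-- B's grouping loop is the 4-chunking
lemma altGroups_eq (ds : List Char) : pvAltGroups ds = pvChunks ds := by
  induction ds using pvChunks.induct with
  | case1 a b c d t ih =>
    have h1 : PySem.List.slice (a :: b :: c :: d :: t) none (some 4) = [a, b, c, d] := by
      rw [PySem.List.slice_to _ (by norm_num)]; rfl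
    have h2 : PySem.List.slice (a :: b :: c :: d :: t) (some 4) none = t := by
      rw [PySem.List.slice_from _ (by norm_num)]; rfl
    rw [pvAltGroups, dif_pos (by simp only [List.length_cons]; omega)]
    rw [h1, h2, ih]
    simp [pvChunks]
  | case2 l hl =>
    rcases l with _ | ⟨a, _ | ⟨b, _ | ⟨c, _ | ⟨d, t⟩⟩⟩⟩
    · rw [pvAltGroups, dif_neg (by simp)]; simp [pvChunks]
    · rw [pvAltGroups, dif_neg (by simp)]; simp [pvChunks]
    · rw [pvAltGroups, dif_neg (by simp)]; simp [pvChunks]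
    · rw [pvAltGroups, dif_neg (by simp)]; simp [pvChunks]
    · exact ((hl a b c d t rfl).elim)

-- PySem.Chars.join unfolding facts for this proof
lemma join_nil_sep (sep : List Char) : PySem.Chars.join sep [] = [] := by
  simp [PySem.Chars.join, List.intercalate]

lemma join_cons₂ (sep g g2 : List Char) (rest : List (List Char)) :
    PySem.Chars.join sep (g :: g2 :: rest) = g ++ sep ++ PySem.Chars.join sep (g2 :: rest) := by
  simp [PySem.Chars.join, List.intercalate, List.intersperse_cons₂]

lemma join_nil_eq_flatten (gs : List (List Char)) :
    PySem.Chars.join [] gs = gs.flatten := by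
  induction gs with
  | nil => simp
  | cons g gs ih =>
    cases gs with
    | nil => simp
    | cons g2 rest => rw [join_cons₂, ih]; simp

lemma join_colon_flat (gs : List (List Char)) (hne : gs ≠ []) :
    (gs.map (fun g => g ++ [':'])).flatten = PySem.Chars.join [':'] gs ++ [':'] := by
  induction gs with
  | nil => exact absurd rfl hne
  | cons g gs ih =>
    cases gs with
    | nil => simp
    | cons g2 rest =>
      simp only [List.map_cons, List.flatten_cons] at ih ⊢
      rw [ih (by simp), join_cons₂]
      simp

-- A's colon fold over 4-char groups appends each group followed by ':'
lemma foldDots (gs : List (List Char)) (h4 : ∀ g ∈ gs, g.length = 4) (r : List Char) :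
    (gs.flatten.foldl
      (fun (st : List Char × Int) i =>
        let result := st.1 ++ [i]
        let count := st.2 + 1
        if count = 4 then (result ++ [':'], 0) else (result, count))
      (r, 0)) = (r ++ (gs.map (fun g => g ++ [':'])).flatten, 0) := by
  induction gs generalizing r with
  | nil => simp
  | cons g gs ih =>
    obtain ⟨a, b, c, d, rfl⟩ : ∃ a b c d, g = [a, b, c, d] := by
      have hg := h4 g (by simp)
      match g, hg with
      | [a, b, c, d], _ => exact ⟨a, b, c, d, rfl⟩
    rw [List.flatten_cons, List.foldl_append]
    have hstep : ([a, b, c, d] : List Char).foldl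
        (fun (st : List Char × Int) i =>
          let result := st.1 ++ [i]
          let count := st.2 + 1
          if count = 4 then (result ++ [':'], 0) else (result, count))
        (r, 0) = (r ++ [a, b, c, d, ':'], 0) := by
      simp only [List.foldl_cons, List.foldl_nil]
      norm_num
    rw [hstep, ih (fun g hg => h4 g (by simp [hg])) (r ++ [a, b, c, d, ':'])]
    simp

lemma addDots_eq (gs : List (List Char)) (h4 : ∀ g ∈ gs, g.length = 4) :
    pvAddDoubleDots gs = PySem.Chars.join [':'] gs := by
  rcases gs with _ | ⟨g, rest⟩
  · rw [join_nil_sep]; decide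
  · simp only [pvAddDoubleDots, join_nil_eq_flatten]
    rw [foldDots (g :: rest) h4 []]
    simp only [List.nil_append]
    rw [join_colon_flat (g :: rest) (by simp)]
    have hlen : ((PySem.Chars.join [':'] (g :: rest) ++ [':']).length : Int) - 1
        = ((PySem.Chars.join [':'] (g :: rest)).length : Nat) := by
      simp only [List.length_append, List.length_cons, List.length_nil]
      push_cast
      ring
    rw [hlen, PySem.List.slice_to_natCast]
    simp

lemma hex_map (l : List Char) :
    (pvChunks l).map (fun g => pvMakeHexaDict.getD (pvSumOf g) ['?'])
      = ((pvChunks l).map pvHexOf).map (fun c => [c]) := by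
  rw [List.map_map]
  apply List.map_congr_left
  intro g hg
  obtain ⟨a, b, c, d, rfl⟩ : ∃ a b c d, g = [a, b, c, d] := by
    have hlg := pvChunks_length l g hg
    match g, hlg with
    | [a, b, c, d], _ => exact ⟨a, b, c, d, rfl⟩
  exact sum_hex a b c d

-- ===== VERDICT (by name: the statement is the Claim_ definition above) =====
theorem convert_to_hexadecimal_spec : Claim_equal_convert_to_hexadecimal := by
  intro s _ hpre
  have hmod : (s.toList.filter (· ≠ ':')).length % 4 = 0 := hpre
  unfold Spec_convert_to_hexadecimal
  show convert_to_hexadecimal s = convert_to_hexadecimal_alt s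
  unfold convert_to_hexadecimal convert_to_hexadecimal_alt
  -- A side
  rw [pvSplitFour_eq]
  simp only [replace_colon]
  rw [pvFindSum_eq, PySem.List.foldl_append_singleton_eq_map]
  simp only [List.nil_append, List.map_map, Function.comp_def]
  rw [hex_map, pvMakeGroups_eq]
  -- B side
  rw [altDigits_eq _ hmod, altGroups_eq]
  -- identical group lists; the two formatters agree on 4-char groups
  congr 1
  exact addDots_eq _ (pvChunks_length _)
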